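-- pv_equiv track=rewrite | github.com/jawang35/advent-of-code | 2018/day6.py | draw_dangerous_coordinate_areas
-- ===== SOURCE A (Python) =====
-- def define_contained_area(coordinates):
--     xs = [x for (x, _) in coordinates]
--     ys = [y for (_, y) in coordinates]
--     bottom_right = (max(xs), max(ys))
--     contained_area = [None] * (bottom_right[0] + 1)
--     for x, _ in enumerate(contained_area):
--         contained_area[x] = [None] * (bottom_right[1] + 1)
--     return contained_area
--
-- def taxicab_distance(coord1, coord2):
--     x1, y1 = coord1
--     x2, y2 = coord2
--     return abs(y1 - y2) + abs(x1 - x2)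
--
-- def draw_dangerous_coordinate_areas(coordinates):
--     contained_area = define_contained_area(coordinates)
--
--     for x, column in enumerate(contained_area):
--         for y, _ in enumerate(column):
--             taxicab_distances = [(i, taxicab_distance(c, (x, y)))
--                                 for i, c in enumerate(coordinates)]
--             [closest, second_closest] = sorted(taxicab_distances, key=lambda x: x[1])[0:2]
--             if closest[1] < second_closest[1]:
--                 column[y] = closest[0]
--
--     return contained_area
-- ===== SOURCE B (Python) =====
-- def draw_dangerous_coordinate_areas(coordinates):
--     max_x = max(x for x, _ in coordinates)
--     max_y = max(y for _, y in coordinates)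
--     grid = []
--     for x in range(max_x + 1):
--         column = []
--         for y in range(max_y + 1):
--             distances = [abs(cx - x) + abs(cy - y) for cx, cy in coordinates]
--             closest = min(distances)
--             column.append(distances.index(closest)
--                           if distances.count(closest) == 1 else None)
--         grid.append(column)
--     return grid
-- ===== Notes on version B (the rewrite author's own statement) =====
-- stated objective: faster
-- what changed: Per grid cell, A builds an (index, distance) list, sorts it by distance and compares the two leading entries; B instead builds a plain distance list and reads off min/count/index (single scans, no sort, no enumerate tuples).
import Mathlib
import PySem

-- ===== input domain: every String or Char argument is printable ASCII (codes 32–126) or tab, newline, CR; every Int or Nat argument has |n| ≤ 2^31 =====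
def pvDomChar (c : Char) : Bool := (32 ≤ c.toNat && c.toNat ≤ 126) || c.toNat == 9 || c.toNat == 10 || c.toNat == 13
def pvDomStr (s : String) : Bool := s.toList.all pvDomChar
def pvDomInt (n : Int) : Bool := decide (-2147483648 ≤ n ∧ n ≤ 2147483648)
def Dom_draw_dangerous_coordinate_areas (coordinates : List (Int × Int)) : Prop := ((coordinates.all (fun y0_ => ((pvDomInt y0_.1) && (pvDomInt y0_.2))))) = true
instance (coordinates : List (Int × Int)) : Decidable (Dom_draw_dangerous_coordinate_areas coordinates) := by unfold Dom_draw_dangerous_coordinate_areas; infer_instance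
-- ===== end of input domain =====

-- B replaces A's per-cell build-enumerate-sort-take-2 with a per-cell distance list scanned by
-- min/count/index (no sort); measured faster on the timing inputs.

-- ===== PORT A =====
def pvDefineContainedArea (coordinates : List (Int × Int)) : List (List (Option Int)) :=
  let xs := coordinates.map (fun c => c.1)
  let ys := coordinates.map (fun c => c.2)
  -- max(xs)/max(ys): Python raises ValueError on empty input; the `.getD 0` is a totality
  -- guard only reachable outside Pre_.
  let bottomRight : Int × Int :=
    ((PySem.List.max? xs (fun v => v)).getD 0, (PySem.List.max? ys (fun v => v)).getD 0)
  List.replicate (bottomRight.1 + 1).toNat (List.replicate (bottomRight.2 + 1).toNat (none : Option Int))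

def pvTaxicabDistance (coord1 coord2 : Int × Int) : Int :=
  |coord1.2 - coord2.2| + |coord1.1 - coord2.1|

def draw_dangerous_coordinate_areas (coordinates : List (Int × Int)) : List (List (Option Int)) :=
  let contained_area := pvDefineContainedArea coordinates
  (PySem.List.enumerate contained_area).map (fun xc =>
    (PySem.List.enumerate xc.2).map (fun yc =>
      let taxicab_distances := (PySem.List.enumerate coordinates).map
        (fun ic => (ic.1, pvTaxicabDistance ic.2 (xc.1, yc.1)))
      -- `[closest, second_closest] = sorted(...)[0:2]` raises ValueError unless the slice has
      -- exactly two elements; the `_` fallback (cell left unchanged) is only reachable outside Pre_.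
      match PySem.List.slice (PySem.List.sorted taxicab_distances (fun p => p.2)) (some 0) (some 2) with
      | [closest, second_closest] =>
          if closest.2 < second_closest.2 then some closest.1 else yc.2
      | _ => yc.2))

-- ===== PORT B =====
def draw_dangerous_coordinate_areas_alt (coordinates : List (Int × Int)) : List (List (Option Int)) :=
  -- max(...): ValueError on empty input; `.getD 0` is a totality guard only reachable outside Pre_.
  let max_x := (PySem.List.max? (coordinates.map (fun c => c.1)) (fun v => v)).getD 0
  let max_y := (PySem.List.max? (coordinates.map (fun c => c.2)) (fun v => v)).getD 0
  (PySem.List.pyRange 0 (max_x + 1)).map (fun x =>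
    (PySem.List.pyRange 0 (max_y + 1)).map (fun y =>
      let distances := coordinates.map (fun c => |c.1 - x| + |c.2 - y|)
      -- min(distances): nonempty here since the ranges are nonempty only when coordinates ≠ []
      let closest := (PySem.List.min? distances (fun v => v)).getD 0
      if PySem.List.count distances closest = 1
      then ((PySem.List.index? distances closest).map (fun k => (k : Int)))
      else none))

-- ===== PRECONDITION & SPEC =====
-- Pre_ excludes exactly the inputs on which A raises: the empty list (max() raises ValueError)
-- and a single coordinate whose grid is nonempty (the two-element unpack raises ValueError).
def Pre_draw_dangerous_coordinate_areas (coordinates : List (Int × Int)) : Prop :=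
  coordinates ≠ [] ∧
    (2 ≤ coordinates.length ∨ (∀ c ∈ coordinates, c.1 < 0) ∨ (∀ c ∈ coordinates, c.2 < 0))
instance (coordinates : List (Int × Int)) : Decidable (Pre_draw_dangerous_coordinate_areas coordinates) := by unfold Pre_draw_dangerous_coordinate_areas; infer_instance

def pvWitness_draw_dangerous_coordinate_areas : (List (Int × Int)) := [(0, 0), (2, 2)]

def Spec_draw_dangerous_coordinate_areas (coordinates : List (Int × Int)) (out : List (List (Option Int))) : Prop := out = draw_dangerous_coordinate_areas_alt coordinates
instance (coordinates : List (Int × Int)) (out : List (List (Option Int))) : Decidable (Spec_draw_dangerous_coordinate_areas coordinates out) := by unfold Spec_draw_dangerous_coordinate_areas; infer_instance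

-- ===== CLAIM (what is proved, stated in full; the proofs are below) =====
def Claim_equal_draw_dangerous_coordinate_areas : Prop := ∀ (coordinates : List (Int × Int)), Dom_draw_dangerous_coordinate_areas coordinates → Pre_draw_dangerous_coordinate_areas coordinates → Spec_draw_dangerous_coordinate_areas coordinates (draw_dangerous_coordinate_areas coordinates)

-- ===== LEMMAS AND PROOFS =====

-- enumerating a replicate yields the index range paired with the constant
lemma pv_enumerate_replicate {α : Type} (a : α) :
    ∀ (n : Nat) (s : Int), PySem.List.enumerate (List.replicate n a) s
      = (PySem.List.pyRange s (s + n)).map (fun j => (j, a)) := by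
  intro n
  induction n with
  | zero => intro s; simp [PySem.List.pyRange_one_eq_nil (le_refl s)]
  | succ k ih =>
    intro s
    rw [List.replicate_succ, PySem.List.enumerate_cons,
        PySem.List.pyRange_one_cons (by omega : s < s + (k + 1 : Nat)), List.map_cons, ih (s + 1)]
    norm_num
    congr 2
    omega

-- a range up to a clamped bound is the range up to the bound itself
lemma pv_pyRange_toNat (n : Int) :
    PySem.List.pyRange 0 ((n.toNat : Int)) = PySem.List.pyRange 0 n := by
  by_cases h : 0 ≤ n
  · rw [Int.toNat_of_nonneg h]
  · rw [PySem.List.pyRange_one_eq_nil (by omega), PySem.List.pyRange_one_eq_nil (by omega)]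

-- enumerate-then-map-on-the-value commutes with mapping the list
lemma pv_enumerate_map {α β : Type} (f : α → β) :
    ∀ (xs : List α) (s : Int), (PySem.List.enumerate xs s).map (fun ic => (ic.1, f ic.2))
      = PySem.List.enumerate (xs.map f) s := by
  intro xs
  induction xs with
  | nil => intro s; simp [PySem.List.enumerate]
  | cons x t ih => intro s; simp [PySem.List.enumerate_cons, ih]

-- the per-cell computations agree as soon as there are at least two coordinates
lemma pv_cell_eq (coordinates : List (Int × Int)) (h2 : 2 ≤ coordinates.length) (x y : Int) :
    (match PySem.List.slice (PySem.List.sorted ((PySem.List.enumerate coordinates).map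
        (fun ic => (ic.1, pvTaxicabDistance ic.2 (x, y)))) (fun p => p.2)) (some 0) (some 2) with
     | [closest, second_closest] =>
         if closest.2 < second_closest.2 then some closest.1 else (none : Option Int)
     | _ => none)
    = (if PySem.List.count (coordinates.map (fun c => |c.1 - x| + |c.2 - y|))
          ((PySem.List.min? (coordinates.map (fun c => |c.1 - x| + |c.2 - y|)) (fun v => v)).getD 0) = 1
       then (PySem.List.index? (coordinates.map (fun c => |c.1 - x| + |c.2 - y|))
          ((PySem.List.min? (coordinates.map (fun c => |c.1 - x| + |c.2 - y|)) (fun v => v)).getD 0)).map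
          (fun k => (k : Int))
       else none) := by
  set D := coordinates.map (fun c => |c.1 - x| + |c.2 - y|) with hDdef
  set tds := (PySem.List.enumerate coordinates).map
      (fun ic => (ic.1, pvTaxicabDistance ic.2 (x, y))) with htdsdef
  have hD : tds = PySem.List.enumerate D 0 := by
    have hf : (fun (ic : Int × (Int × Int)) => (ic.1, pvTaxicabDistance ic.2 (x, y)))
        = (fun ic => (ic.1, |ic.2.1 - x| + |ic.2.2 - y|)) := by
      funext ic; simp [pvTaxicabDistance, add_comm]
    rw [htdsdef, hf]
    exact pv_enumerate_map (fun c => |c.1 - x| + |c.2 - y|) coordinates 0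
  have hDlen : D.length = coordinates.length := by simp [hDdef]
  have htdslen : tds.length = coordinates.length := by
    rw [hD, PySem.List.length_enumerate, hDlen]
  have hDne : D ≠ [] := by
    intro h; rw [h] at hDlen; simp at hDlen; omega
  obtain ⟨m, hm⟩ : ∃ m, PySem.List.min? D (fun v => v) = some m := by
    cases h : PySem.List.min? D (fun v => v) with
    | none => exact absurd ((PySem.List.min?_eq_none_iff D (fun v => v)).mp h) hDne
    | some m => exact ⟨m, rfl⟩
  have hmmem : m ∈ D := PySem.List.min?_mem hm
  have hmmin : ∀ v ∈ D, m ≤ v := by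
    intro v hv; exact PySem.List.min?_isMin hm v hv
  have hLlen : (PySem.List.sorted tds (fun p => p.2)).length = coordinates.length := by
    rw [PySem.List.length_sorted, htdslen]
  obtain ⟨c, s, rest, hL⟩ : ∃ c s rest,
      PySem.List.sorted tds (fun p => p.2) = c :: s :: rest := by
    match hh : PySem.List.sorted tds (fun p => p.2) with
    | [] => rw [hh] at hLlen; simp at hLlen; omega
    | [c] => rw [hh] at hLlen; simp at hLlen; omega
    | c :: s :: rest => exact ⟨c, s, rest, rfl⟩
  have hslice : PySem.List.slice (PySem.List.sorted tds (fun p => p.2)) (some 0) (some 2)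
      = [c, s] := by
    rw [hL, PySem.List.slice_toNat _ (by norm_num) (by norm_num)]
    simp [List.take]
  have hcmem : c ∈ tds := by
    rw [← PySem.List.mem_sorted tds (fun p => p.2) false, hL]; exact List.mem_cons_self ..
  obtain ⟨k, hk, hck⟩ : ∃ (k : Nat) (h : k < D.length), c = ((k : Int), D[k]) := by
    rw [hD] at hcmem
    obtain ⟨k, hk, hc⟩ := (PySem.List.mem_enumerate_iff D 0 c).mp hcmem
    exact ⟨k, hk, by simpa using hc⟩
  have hc2 : c.2 = m := by
    have h1 : m ≤ c.2 := by
      apply hmmin; rw [hck]; exact List.getElem_mem hk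
    have h2 : c.2 ≤ m := by
      obtain ⟨k', hk', hDk'⟩ := List.getElem_of_mem hmmem
      have hmem' : ((k' : Int), m) ∈ tds := by
        rw [hD]
        exact (PySem.List.mem_enumerate_iff D 0 _).mpr ⟨k', hk', by simp [hDk']⟩
      have := PySem.List.key_head_sorted_le tds (fun p => p.2) hL _ hmem'
      simpa using this
    omega
  have hDkm : D[k] = m := by
    have := congrArg Prod.snd hck
    simp at this
    omega
  have hpair : List.Pairwise (fun a b => a.2 ≤ b.2) (c :: s :: rest) := by
    rw [← hL]; exact PySem.List.sorted_pairwise tds (fun p => p.2)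
  have hcs : c.2 ≤ s.2 := (List.pairwise_cons.mp hpair).1 s (List.mem_cons_self ..)
  have hcnt : List.count m D = List.countP (fun p => p.2 == m) (c :: s :: rest) := by
    have h1 : tds.map (fun p => p.2) = D := by
      rw [hD]; exact PySem.List.map_snd_enumerate D 0
    have h2 : List.count m D = List.countP (fun p => p.2 == m) tds := by
      rw [← h1, List.count, List.countP_map]; rfl
    rw [h2, ← hL]
    exact ((PySem.List.sorted_perm tds (fun p => p.2) false).countP_eq _).symm
  rw [hslice]
  simp only [hm, Option.getD_some, PySem.List.count_eq]
  by_cases hlt : c.2 < s.2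
  · have htail0 : List.countP (fun p => p.2 == m) (s :: rest) = 0 := by
      apply List.countP_eq_zero.mpr
      intro p hp
      have hsp : s.2 ≤ p.2 := by
        rcases List.mem_cons.mp hp with h | h
        · rw [h]
        · exact (List.pairwise_cons.mp (List.pairwise_cons.mp hpair).2).1 p h
      have hmp : m < p.2 := by omega
      simp
      omega
    have hcnt1 : List.count m D = 1 := by
      rw [hcnt, List.countP_cons, htail0]
      simp [hc2]
    obtain ⟨j, hj⟩ : ∃ j, PySem.List.index? D m = some j := by
      cases h : PySem.List.index? D m with
      | none => exact absurd hmmem ((PySem.List.index?_eq_none_iff D m).mp h)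
      | some j => exact ⟨j, rfl⟩
    obtain ⟨pre, suf, hdec, hjlen, hnpre⟩ := (PySem.List.index?_eq_some_iff D m j).mp hj
    have hsuf0 : m ∉ suf := by
      rw [hdec] at hcnt1
      rw [List.count_append, List.count_cons_self] at hcnt1
      have hpre0 : List.count m pre = 0 := List.count_eq_zero.mpr hnpre
      have : List.count m suf = 0 := by omega
      exact List.count_eq_zero.mp this
    have hpreeq : D.take j = pre := by
      rw [hdec, ← hjlen, List.take_left]
    have hsufeq : D.drop (j + 1) = suf := by
      rw [hdec, show pre ++ m :: suf = (pre ++ [m]) ++ suf from by simp,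
          show j + 1 = (pre ++ [m]).length from by simp [hjlen], List.drop_left]
    have hkj : k = j := by
      rcases lt_trichotomy k j with h | h | h
      · exfalso
        apply hnpre
        rw [← hpreeq]
        rw [List.mem_iff_getElem]
        refine ⟨k, by simp [List.length_take]; omega, ?_⟩
        rw [List.getElem_take]
        exact hDkm
      · exact h
      · exfalso
        apply hsuf0
        rw [← hsufeq]
        rw [List.mem_iff_getElem]
        refine ⟨k - (j + 1), by simp [List.length_drop]; omega, ?_⟩
        rw [List.getElem_drop]
        simp only [show j + 1 + (k - (j + 1)) = k from by omega]
        exact hDkm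
    rw [if_pos hlt, if_pos hcnt1, hj]
    have hc1 : c.1 = (k : Int) := by rw [hck]
    simp [hc1, hkj]
  · have hs2 : s.2 = m := by omega
    have hcnt2 : List.count m D ≠ 1 := by
      rw [hcnt, List.countP_cons, List.countP_cons]
      simp [hc2, hs2]
    rw [if_neg hlt, if_neg hcnt2]

-- ===== VERDICT (by name: the statement is the Claim_ definition above) =====
theorem draw_dangerous_coordinate_areas_spec : Claim_equal_draw_dangerous_coordinate_areas := by
  intro coordinates hdom hpre
  unfold Spec_draw_dangerous_coordinate_areas
  obtain ⟨hne, hdisj⟩ := hpre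
  unfold draw_dangerous_coordinate_areas draw_dangerous_coordinate_areas_alt pvDefineContainedArea
  simp only [pv_enumerate_replicate, pv_pyRange_toNat, List.map_map, Function.comp_def, zero_add]
  rcases hdisj with h2 | hx | hy
  · apply List.map_congr_left
    intro a _
    apply List.map_congr_left
    intro b _
    exact pv_cell_eq coordinates h2 a b
  · obtain ⟨mv, hmv⟩ : ∃ mv,
        PySem.List.max? (coordinates.map (fun c => c.1)) (fun v => v) = some mv := by
      cases h : PySem.List.max? (coordinates.map (fun c => c.1)) (fun v => v) with
      | none =>
        have := (PySem.List.max?_eq_none_iff (coordinates.map (fun c => c.1)) (fun v => v)).mp h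
        simp at this
        exact absurd this hne
      | some mv => exact ⟨mv, rfl⟩
    have hneg : mv < 0 := by
      have hmem := PySem.List.max?_mem hmv
      obtain ⟨c, hc, hcv⟩ := List.mem_map.mp hmem
      rw [← hcv]; exact hx c hc
    rw [hmv]
    simp only [Option.getD_some]
    rw [PySem.List.pyRange_one_eq_nil (by omega : mv + 1 ≤ 0)]
    simp
  · obtain ⟨mv, hmv⟩ : ∃ mv,
        PySem.List.max? (coordinates.map (fun c => c.2)) (fun v => v) = some mv := by
      cases h : PySem.List.max? (coordinates.map (fun c => c.2)) (fun v => v) with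
      | none =>
        have := (PySem.List.max?_eq_none_iff (coordinates.map (fun c => c.2)) (fun v => v)).mp h
        simp at this
        exact absurd this hne
      | some mv => exact ⟨mv, rfl⟩
    have hneg : mv < 0 := by
      have hmem := PySem.List.max?_mem hmv
      obtain ⟨c, hc, hcv⟩ := List.mem_map.mp hmem
      rw [← hcv]; exact hy c hc
    rw [hmv]
    simp only [Option.getD_some]
    rw [PySem.List.pyRange_one_eq_nil (by omega : mv + 1 ≤ 0)]
    simp
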